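-- pv_equiv track=rewrite | github.com/jcolinpatrick/kryptos | scripts/e_extend_xor_autokey_00.py | find_consistent_periods
-- ===== SOURCE A (Python) =====
-- def find_consistent_periods(ks_dict):
--     consistent = []
--     for p in range(1, 27):
--         residue = {}
--         ok = True
--         for pos, kv in ks_dict.items():
--             r = pos % p
--             if r in residue:
--                 if residue[r] != kv:
--                     ok = False
--                     break
--             else:
--                 residue[r] = kv
--         if ok:
--             consistent.append((p, residue))
--     return consistent
-- ===== SOURCE B (Python) =====
-- def find_consistent_periods(ks_dict):
--     # A period p is inconsistent exactly when two positions holding different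
--     # values differ by a multiple of p.  So: group positions by value once,
--     # then sieve the candidate periods 1..26 with the cross-group position
--     # differences, stopping as soon as every period is ruled out.
--     groups = {}
--     for pos, kv in ks_dict.items():
--         groups.setdefault(kv, []).append(pos)
--     alive = _sieve_periods(list(groups.values()))
--     consistent = []
--     for p in alive:
--         residue = {}
--         for pos, kv in ks_dict.items():
--             residue.setdefault(pos % p, kv)
--         consistent.append((p, residue))
--     return consistent
--
--
-- def _sieve_periods(glist):
--     alive = list(range(1, 27))
--     done = []
--     for g in glist:
--         for h in done:
--             for a in g:
--                 for b in h:
--                     d = a - b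
--                     alive = [p for p in alive if d % p != 0]
--                     if not alive:
--                         return alive
--         done.append(g)
--     return alive
-- ===== Notes on version B (the rewrite author's own statement) =====
-- stated objective: alternative
-- what changed: A tests each period 1..26 independently by bucketing positions mod p with an early break on a conflicting value; B uses a number-theoretic characterization: a period p is inconsistent iff p divides the difference of two positions holding different values, so it groups positions by value once, sieves the candidate list 1..26 with cross-group position differences (stopping when no candidate survives), and only then builds the residue dicts for the surviving periods.
import Mathlib
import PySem

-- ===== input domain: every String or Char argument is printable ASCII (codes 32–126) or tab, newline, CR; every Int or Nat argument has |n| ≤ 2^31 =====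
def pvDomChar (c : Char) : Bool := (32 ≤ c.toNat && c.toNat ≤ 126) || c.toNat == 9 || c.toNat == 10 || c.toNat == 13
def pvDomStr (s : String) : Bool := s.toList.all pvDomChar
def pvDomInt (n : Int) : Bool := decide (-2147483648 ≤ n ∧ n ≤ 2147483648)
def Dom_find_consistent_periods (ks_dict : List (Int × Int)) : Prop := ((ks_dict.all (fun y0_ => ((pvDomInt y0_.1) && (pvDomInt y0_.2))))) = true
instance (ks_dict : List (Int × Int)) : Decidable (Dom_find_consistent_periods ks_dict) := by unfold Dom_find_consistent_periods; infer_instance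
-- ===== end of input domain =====

-- B replaces A's per-period residue bucketing by a number-theoretic sieve: a period p is
-- inconsistent iff p divides the difference of two positions holding different values, so B
-- groups positions by value once, sieves the candidates 1..26 with cross-group differences,
-- and builds residue dicts only for the survivors (objective: alternative; no speed claim).

-- ===== PORT A =====
-- the inner 'for pos, kv in ks_dict.items()' loop, with its break, as structural recursion
def aLoop (p : Int) : List (Int × Int) → PySem.Dict Int Int → (PySem.Dict Int Int × Bool)
  | [], residue => (residue, true)
  | (pos, kv) :: rest, residue =>
      match residue.get? (PySem.Int.mod pos p) with
      | some v => if v != kv then (residue, false) else aLoop p rest residue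
      | none => aLoop p rest (residue.insert (PySem.Int.mod pos p) kv)

def find_consistent_periods (ks_dict : List (Int × Int)) : List (Int × (List (Int × Int))) :=
  (PySem.List.pyRange 1 27 1).foldl (fun acc p =>
    match aLoop p ks_dict PySem.Dict.empty with
    | (residue, ok) => if ok then acc ++ [(p, residue.items)] else acc) []

-- ===== PORT B =====
-- 'groups.setdefault(kv, []).append(pos)' is Dict.modify with default []
def bGroups (l : List (Int × Int)) : PySem.Dict Int (List Int) :=
  l.foldl (fun g q => g.modify q.2 [] (· ++ [q.1])) PySem.Dict.empty

-- 'alive = [p for p in alive if d % p != 0]'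
def sievePair (alive : List Int) (d : Int) : List Int :=
  alive.filter (fun p => PySem.Int.mod d p != 0)

-- 'for a in g: for b in h: …'; the Python 'if not alive: return alive' only short-circuits:
-- [] is a fixed point of every later filter, so the plain fold computes the same list
def sieveGH (g h : List Int) (alive : List Int) : List Int :=
  g.foldl (fun al a => h.foldl (fun al b => sievePair al (a - b)) al) alive

-- 'for g in glist: for h in done: …; done.append(g)'
def sieveGroups : List (List Int) → List (List Int) → List Int → List Int
  | [], _, alive => alive
  | g :: rest, done, alive =>
      sieveGroups rest (done ++ [g]) (done.foldl (fun al h => sieveGH g h al) alive)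

-- 'residue.setdefault(pos % p, kv)' over the items
def firstSeen (p : Int) (l : List (Int × Int)) : PySem.Dict Int Int :=
  l.foldl (fun d q => d.setdefault (PySem.Int.mod q.1 p) q.2) PySem.Dict.empty

def find_consistent_periods_alt (ks_dict : List (Int × Int)) : List (Int × (List (Int × Int))) :=
  (sieveGroups (bGroups ks_dict).values [] (PySem.List.pyRange 1 27 1)).foldl
    (fun acc p => acc ++ [(p, (firstSeen p ks_dict).items)]) []

-- ===== PRECONDITION & SPEC =====
def Spec_find_consistent_periods (ks_dict : List (Int × Int)) (out : List (Int × (List (Int × Int)))) : Prop := out = find_consistent_periods_alt ks_dict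
instance (ks_dict : List (Int × Int)) (out : List (Int × (List (Int × Int)))) : Decidable (Spec_find_consistent_periods ks_dict out) := by unfold Spec_find_consistent_periods; infer_instance

-- ===== CLAIM (what is proved, stated in full; the proofs are below) =====
def Claim_equal_find_consistent_periods : Prop := ∀ (ks_dict : List (Int × Int)), Dom_find_consistent_periods ks_dict → Spec_find_consistent_periods ks_dict (find_consistent_periods ks_dict)

-- ===== LEMMAS AND PROOFS =====

-- no two positions with the same residue mod p hold different values
def NoConf (p : Int) (l : List (Int × Int)) : Prop :=
  ∀ x ∈ l, ∀ y ∈ l, PySem.Int.mod (x.1 - y.1) p = 0 → x.2 = y.2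

def ghDiffs (g h : List Int) : List Int := g.flatMap (fun a => h.map (fun b => a - b))

def crossDiffs : List (List Int) → List (List Int) → List Int
  | [], _ => []
  | g :: rest, done => done.flatMap (fun h => ghDiffs g h) ++ crossDiffs rest (done ++ [g])

-- folding the per-difference filter over a diff list = one filter by the conjunction
lemma foldl_sievePair (ds : List Int) (al : List Int) :
    ds.foldl sievePair al = al.filter (fun p => ds.all (fun d => PySem.Int.mod d p != 0)) := by
  induction ds generalizing al with
  | nil => simp
  | cons d ds ih =>
    simp only [List.foldl_cons, ih, sievePair, List.filter_filter, List.all_cons]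
    exact List.filter_congr (fun a _ => Bool.and_comm _ _)

lemma sieveGH_eq (g h : List Int) (al : List Int) :
    sieveGH g h al = (ghDiffs g h).foldl sievePair al := by
  simp only [sieveGH, ghDiffs, List.foldl_flatMap, List.foldl_map]

lemma sieveGroups_eq : ∀ (gs done : List (List Int)) (al : List Int),
    sieveGroups gs done al
      = al.filter (fun p => (crossDiffs gs done).all (fun d => PySem.Int.mod d p != 0)) := by
  intro gs
  induction gs with
  | nil => intro done al; simp [sieveGroups, crossDiffs]
  | cons g rest ih =>
    intro done al
    show sieveGroups rest (done ++ [g]) (done.foldl (fun al h => sieveGH g h al) al) = _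
    have h1 : done.foldl (fun al h => sieveGH g h al) al
        = (done.flatMap (fun h => ghDiffs g h)).foldl sievePair al := by
      simp only [List.foldl_flatMap]
      exact PySem.List.foldl_congr_mem _ _ _ _ (fun al2 h _ => sieveGH_eq g h al2)
    rw [ih, h1, foldl_sievePair, List.filter_filter]
    show _ = al.filter fun p => (crossDiffs (g :: rest) done).all fun d => PySem.Int.mod d p != 0
    have h2 : crossDiffs (g :: rest) done
        = done.flatMap (fun h => ghDiffs g h) ++ crossDiffs rest (done ++ [g]) := rfl
    rw [h2]
    apply List.filter_congr
    intro p _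
    simp [List.all_append, Bool.and_comm]

lemma cd_mem : ∀ (gs done : List (List Int)) (g h : List Int) (a b : Int),
    h ∈ done → g ∈ gs → a ∈ g → b ∈ h → (a - b) ∈ crossDiffs gs done := by
  intro gs
  induction gs with
  | nil => intro done g h a b _ hg; cases hg
  | cons g0 rest ih =>
    intro done g h a b hh hg ha hb
    show (a - b) ∈ done.flatMap (fun h => ghDiffs g0 h) ++ crossDiffs rest (done ++ [g0])
    rcases List.mem_cons.mp hg with rfl | hg'
    · exact List.mem_append_left _ (List.mem_flatMap.mpr ⟨h, hh,
        List.mem_flatMap.mpr ⟨a, ha, List.mem_map.mpr ⟨b, hb, rfl⟩⟩⟩)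
    · exact List.mem_append_right _ (ih (done ++ [g0]) g h a b
        (List.mem_append_left _ hh) hg' ha hb)

lemma cd_mem2 : ∀ (gs done : List (List Int)) (i j : Nat) (hj : j < i) (hi : i < gs.length)
    (a b : Int), a ∈ gs[i] → b ∈ gs[j]'(lt_trans hj hi) → (a - b) ∈ crossDiffs gs done := by
  intro gs
  induction gs with
  | nil => intro done i j hj hi; exact absurd hi (by simp)
  | cons g0 rest ih =>
    intro done i j hj hi a b ha hb
    match j, i with
    | j, 0 => exact absurd hj (by omega)
    | 0, i + 1 =>
      simp only [List.getElem_cons_succ] at ha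
      simp only [List.getElem_cons_zero] at hb
      show (a - b) ∈ done.flatMap (fun h => ghDiffs g0 h) ++ crossDiffs rest (done ++ [g0])
      exact List.mem_append_right _
        (cd_mem rest (done ++ [g0]) (rest[i]'(by simpa using hi)) g0 a b
          (List.mem_append_right _ (List.mem_singleton.mpr rfl))
          (List.getElem_mem _) ha hb)
    | j + 1, i + 1 =>
      simp only [List.getElem_cons_succ] at ha hb
      exact List.mem_append_right _
        (ih (done ++ [g0]) i j (by omega) (by simpa using hi) a b ha hb)

lemma cd_inv : ∀ (gs done : List (List Int)) (d : Int), d ∈ crossDiffs gs done →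
    ∃ (i j : Nat), ∃ (hi : i < (done ++ gs).length) (hj : j < (done ++ gs).length),
      j < i ∧ ∃ a ∈ (done ++ gs)[i], ∃ b ∈ (done ++ gs)[j], d = a - b := by
  intro gs
  induction gs with
  | nil => intro done d hd; cases hd
  | cons g0 rest ih =>
    intro done d hd
    rcases List.mem_append.mp hd with hd | hd
    · obtain ⟨h, hh, hd2⟩ := List.mem_flatMap.mp hd
      obtain ⟨a, ha, hd3⟩ := List.mem_flatMap.mp hd2
      obtain ⟨b, hb, rfl⟩ := List.mem_map.mp hd3
      obtain ⟨j, hjlen, hjget⟩ := List.mem_iff_getElem.mp hh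
      refine ⟨done.length, j, by simp, by simp; omega, hjlen, a, ?_, b, ?_, rfl⟩
      · rw [List.getElem_append_right (Nat.le_refl _)]
        simpa using ha
      · rw [List.getElem_append_left hjlen, hjget]; exact hb
    · obtain ⟨i, j, hi, hjl, hlt, a, ha, b, hb, rfl⟩ := ih (done ++ [g0]) d hd
      have he : done ++ g0 :: rest = done ++ [g0] ++ rest := by simp
      rw [he]
      exact ⟨i, j, hi, hjl, hlt, a, ha, b, hb, rfl⟩

lemma bGroups_getD (l : List (Int × Int)) (c : Int) :
    (bGroups l).getD c [] = (l.filter (fun q => q.2 == c)).map (·.1) := by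
  have hmap : bGroups l
      = (l.map (fun q => (q.2, q.1))).foldl
          (fun d p => d.modify p.1 [] (fun x => x ++ [p.2])) PySem.Dict.empty := by
    rw [List.foldl_map]; rfl
  rw [hmap, PySem.Dict.getD_foldl_modify_append, List.filter_map]
  simp [Function.comp_def, List.map_map, PySem.Dict.getD_empty]

lemma bGroups_nodup (l : List (Int × Int)) : (bGroups l).keys.Nodup := by
  exact PySem.Dict.nodup_keys_foldl_modify_key l (fun q => q.2) []
    (fun _ q => fun v => v ++ [q.1]) PySem.Dict.empty (by simp)

lemma firstSeen_get? (p : Int) : ∀ (l : List (Int × Int)) (r : Int),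
    (firstSeen p l).get? r = (l.find? (fun q => PySem.Int.mod q.1 p == r)).map (·.2) := by
  intro l
  induction l using List.reverseRecOn with
  | nil => intro r; rfl
  | append_singleton l q ih =>
    intro r
    have hfold : firstSeen p (l ++ [q])
        = (firstSeen p l).setdefault (PySem.Int.mod q.1 p) q.2 := by
      simp [firstSeen, List.foldl_append]
    rw [hfold, List.find?_append]
    by_cases hc : (firstSeen p l).contains (PySem.Int.mod q.1 p) = true
    · rw [PySem.Dict.setdefault_of_contains _ _ hc, ih]
      have hsome : (l.find? (fun q' => PySem.Int.mod q'.1 p == PySem.Int.mod q.1 p)).isSome := by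
        rw [PySem.Dict.contains_eq_isSome_get?, ih] at hc
        simpa using hc
      by_cases hr : PySem.Int.mod q.1 p = r
      · subst hr
        obtain ⟨y0, hy0⟩ := Option.isSome_iff_exists.mp hsome
        simp [hy0]
      · have hpq : (PySem.Int.mod q.1 p == r) = false := beq_eq_false_iff_ne.mpr hr
        have : (List.find? (fun q' => PySem.Int.mod q'.1 p == r) [q]) = none := by
          simp [hpq]
        simp [this]
    · have hc' : (firstSeen p l).contains (PySem.Int.mod q.1 p) = false := by
        simpa using hc
      rw [PySem.Dict.setdefault_of_not_contains _ _ hc', PySem.Dict.get?_insert, ih]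
      have hnone : l.find? (fun q' => PySem.Int.mod q'.1 p == PySem.Int.mod q.1 p) = none := by
        rw [PySem.Dict.contains_eq_isSome_get?, ih] at hc'
        cases h : l.find? (fun q' => PySem.Int.mod q'.1 p == PySem.Int.mod q.1 p) with
        | none => rfl
        | some y => rw [h] at hc'; simp at hc'
      by_cases hr : r = PySem.Int.mod q.1 p
      · subst hr; simp [hnone]
      · have hpq : (PySem.Int.mod q.1 p == r) = false :=
          beq_eq_false_iff_ne.mpr (fun h => hr h.symm)
        have : (List.find? (fun q' => PySem.Int.mod q'.1 p == r) [q]) = none := by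
          simp [hpq]
        simp [hr, this]

lemma resid_iff (p : Int) (hp : 0 < p) (a b : Int) :
    PySem.Int.mod (a - b) p = 0 ↔ PySem.Int.mod a p = PySem.Int.mod b p := by
  rw [PySem.Int.mod_eq_emod_of_pos hp, PySem.Int.mod_eq_emod_of_pos hp,
    PySem.Int.mod_eq_emod_of_pos hp, Int.emod_eq_emod_iff_emod_sub_eq_zero]

lemma resid_symm (p : Int) (a b : Int) (h : PySem.Int.mod (a - b) p = 0) :
    PySem.Int.mod (b - a) p = 0 := by
  rw [PySem.Int.mod_eq_zero_iff_dvd] at h ⊢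
  simpa [neg_sub] using dvd_neg.mpr h

lemma mem_bGroups (l : List (Int × Int)) (a c : Int) :
    a ∈ (bGroups l).getD c [] ↔ (a, c) ∈ l := by
  rw [bGroups_getD]
  simp only [List.mem_map, List.mem_filter]
  constructor
  · rintro ⟨⟨q1, q2⟩, ⟨hq, hq2⟩, rfl⟩
    have : q2 = c := by simpa using hq2
    subst this; exact hq
  · intro h
    exact ⟨(a, c), ⟨h, by simp⟩, rfl⟩

lemma entry_getD (l : List (Int × Int)) {e : Int × List Int} (he : e ∈ (bGroups l).items) :
    (bGroups l).getD e.1 [] = e.2 :=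
  PySem.Dict.getD_of_mem_items _ (by simpa using he) (bGroups_nodup l) []

-- B's sieve keeps p iff no same-residue conflict exists
lemma bside (p : Int) (l : List (Int × Int)) :
    ((crossDiffs (bGroups l).values []).all (fun d => PySem.Int.mod d p != 0) = true)
      ↔ NoConf p l := by
  constructor
  · intro hall x hx y hy hmod
    by_contra hne
    have hxg : x.1 ∈ (bGroups l).getD x.2 [] := (mem_bGroups l x.1 x.2).mpr (by simpa using hx)
    have hyg : y.1 ∈ (bGroups l).getD y.2 [] := (mem_bGroups l y.1 y.2).mpr (by simpa using hy)
    obtain ⟨wx, hwx⟩ : ∃ w, (bGroups l).get? x.2 = some w := by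
      cases h : (bGroups l).get? x.2 with
      | none => rw [PySem.Dict.getD_eq_get?_getD, h] at hxg; simp at hxg
      | some w => exact ⟨w, rfl⟩
    obtain ⟨wy, hwy⟩ : ∃ w, (bGroups l).get? y.2 = some w := by
      cases h : (bGroups l).get? y.2 with
      | none => rw [PySem.Dict.getD_eq_get?_getD, h] at hyg; simp at hyg
      | some w => exact ⟨w, rfl⟩
    have hxw : x.1 ∈ wx := by rw [PySem.Dict.getD_eq_get?_getD, hwx] at hxg; simpa using hxg
    have hyw : y.1 ∈ wy := by rw [PySem.Dict.getD_eq_get?_getD, hwy] at hyg; simpa using hyg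
    obtain ⟨i, hilen, hie⟩ := List.mem_iff_getElem.mp (PySem.Dict.mem_items_of_get?_eq_some _ hwx)
    obtain ⟨j, hjlen, hje⟩ := List.mem_iff_getElem.mp (PySem.Dict.mem_items_of_get?_eq_some _ hwy)
    have hvallen : ((bGroups l).values).length = ((bGroups l).items).length := by
      simp [PySem.Dict.values]
    have hvi : ((bGroups l).values)[i]'(by omega) = wx := by
      simp [PySem.Dict.values, hie]
    have hvj : ((bGroups l).values)[j]'(by omega) = wy := by
      simp [PySem.Dict.values, hje]
    have hij : i ≠ j := by
      intro h; subst h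
      rw [hie] at hje
      exact hne (by simpa using congrArg Prod.fst hje)
    rcases Nat.lt_or_ge j i with hlt | hge
    · have hmem := cd_mem2 ((bGroups l).values) [] i j hlt (by omega) x.1 y.1
        (by rw [hvi]; exact hxw) (by rw [hvj]; exact hyw)
      have := List.all_eq_true.mp hall _ hmem
      simp only [bne_iff_ne, ne_eq] at this
      exact this hmod
    · have hlt' : i < j := by omega
      have hmem := cd_mem2 ((bGroups l).values) [] j i hlt' (by omega) y.1 x.1
        (by rw [hvj]; exact hyw) (by rw [hvi]; exact hxw)
      have := List.all_eq_true.mp hall _ hmem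
      simp only [bne_iff_ne, ne_eq] at this
      exact this (resid_symm p _ _ hmod)
  · intro hnc
    rw [List.all_eq_true]
    intro d hd
    obtain ⟨i, j, hi, hj, hlt, a, ha, b, hb, rfl⟩ := cd_inv ((bGroups l).values) [] d hd
    have hi' : i < ((bGroups l).items).length := by simpa [PySem.Dict.values] using hi
    have hj' : j < ((bGroups l).items).length := by simpa [PySem.Dict.values] using hj
    have hvi : ([] ++ (bGroups l).values)[i]'hi = (((bGroups l).items)[i]'hi').2 := by
      simp [PySem.Dict.values]
    have hvj : ([] ++ (bGroups l).values)[j]'hj = (((bGroups l).items)[j]'hj').2 := by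
      simp [PySem.Dict.values]
    rw [hvi] at ha
    rw [hvj] at hb
    have hal : (a, (((bGroups l).items)[i]'hi').1) ∈ l := by
      rw [← mem_bGroups]
      rw [entry_getD l (List.getElem_mem hi')]
      exact ha
    have hbl : (b, (((bGroups l).items)[j]'hj').1) ∈ l := by
      rw [← mem_bGroups]
      rw [entry_getD l (List.getElem_mem hj')]
      exact hb
    have hkeys : (((bGroups l).items)[i]'hi').1 ≠ (((bGroups l).items)[j]'hj').1 := by
      intro h
      have hnd := bGroups_nodup l
      have hk : ((bGroups l).keys)[i]'(by simpa [PySem.Dict.keys] using hi') =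
          ((bGroups l).keys)[j]'(by simpa [PySem.Dict.keys] using hj') := by
        simpa [PySem.Dict.keys] using h
      have := (List.Nodup.getElem_inj_iff hnd).mp hk
      omega
    simp only [bne_iff_ne, ne_eq]
    intro h0
    exact hkeys (hnc _ hal _ hbl h0)

-- A's loop succeeds iff no same-residue conflict exists, and then its dict is firstSeen
lemma aside (p : Int) (hp : 0 < p) : ∀ (rest seen : List (Int × Int)), NoConf p seen →
    ((aLoop p rest (firstSeen p seen)).2 = true ↔ NoConf p (seen ++ rest)) ∧
    ((aLoop p rest (firstSeen p seen)).2 = true →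
      (aLoop p rest (firstSeen p seen)).1 = firstSeen p (seen ++ rest)) := by
  intro rest
  induction rest with
  | nil =>
    intro seen hs
    exact ⟨by simpa [aLoop] using hs, fun _ => by simp [aLoop]⟩
  | cons q rest ih =>
    intro seen hs
    obtain ⟨pos, kv⟩ := q
    have hget := firstSeen_get? p seen (PySem.Int.mod pos p)
    cases hf : seen.find? (fun q' => PySem.Int.mod q'.1 p == PySem.Int.mod pos p) with
    | none =>
      have hg : (firstSeen p seen).get? (PySem.Int.mod pos p) = none := by rw [hget, hf]; rfl
      have hstep : aLoop p ((pos, kv) :: rest) (firstSeen p seen)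
          = aLoop p rest ((firstSeen p seen).insert (PySem.Int.mod pos p) kv) := by
        simp [aLoop, hg]
      have hc : (firstSeen p seen).contains (PySem.Int.mod pos p) = false := by
        rw [PySem.Dict.contains_eq_isSome_get?, hg]; rfl
      have hfs : firstSeen p (seen ++ [(pos, kv)])
          = (firstSeen p seen).insert (PySem.Int.mod pos p) kv := by
        calc firstSeen p (seen ++ [(pos, kv)])
            = (firstSeen p seen).setdefault (PySem.Int.mod pos p) kv := by
              simp [firstSeen, List.foldl_append]
          _ = _ := PySem.Dict.setdefault_of_not_contains _ _ hc
      have hnc' : NoConf p (seen ++ [(pos, kv)]) := by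
        intro x hx y hy hm
        rcases List.mem_append.mp hx with hx | hx <;> rcases List.mem_append.mp hy with hy | hy
        · exact hs x hx y hy hm
        · have hy' : y = (pos, kv) := by simpa using hy
          subst hy'
          exfalso
          have hfind := List.find?_eq_none.mp hf x hx
          have hr : PySem.Int.mod x.1 p = PySem.Int.mod pos p := (resid_iff p hp _ _).mp hm
          simp [hr] at hfind
        · have hx' : x = (pos, kv) := by simpa using hx
          subst hx'
          exfalso
          have hfind := List.find?_eq_none.mp hf y hy
          have hr : PySem.Int.mod y.1 p = PySem.Int.mod pos p :=
            (resid_iff p hp _ _).mp (resid_symm p _ _ hm)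
          simp [hr] at hfind
        · have hx' : x = (pos, kv) := by simpa using hx
          have hy' : y = (pos, kv) := by simpa using hy
          subst hx'; subst hy'; rfl
      rw [hstep, ← hfs]
      have H := ih (seen ++ [(pos, kv)]) hnc'
      simp only [List.append_assoc, List.singleton_append] at H
      exact H
    | some y0 =>
      have hg : (firstSeen p seen).get? (PySem.Int.mod pos p) = some y0.2 := by rw [hget, hf]; rfl
      have hy0mem := List.mem_of_find?_eq_some hf
      have hy0r : PySem.Int.mod y0.1 p = PySem.Int.mod pos p := by
        simpa using List.find?_some hf
      by_cases hvk : y0.2 = kv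
      · have hstep : aLoop p ((pos, kv) :: rest) (firstSeen p seen)
            = aLoop p rest (firstSeen p seen) := by
          simp [aLoop, hg, hvk]
        have hc : (firstSeen p seen).contains (PySem.Int.mod pos p) = true := by
          rw [PySem.Dict.contains_eq_isSome_get?, hg]; rfl
        have hfs : firstSeen p (seen ++ [(pos, kv)]) = firstSeen p seen := by
          calc firstSeen p (seen ++ [(pos, kv)])
              = (firstSeen p seen).setdefault (PySem.Int.mod pos p) kv := by
                simp [firstSeen, List.foldl_append]
            _ = firstSeen p seen := PySem.Dict.setdefault_of_contains _ _ hc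
        have hnc' : NoConf p (seen ++ [(pos, kv)]) := by
          intro x hx y hy hm
          rcases List.mem_append.mp hx with hx | hx <;> rcases List.mem_append.mp hy with hy | hy
          · exact hs x hx y hy hm
          · have hy' : y = (pos, kv) := by simpa using hy
            subst hy'
            have hr : PySem.Int.mod x.1 p = PySem.Int.mod pos p := (resid_iff p hp _ _).mp hm
            have hx2 : x.2 = y0.2 :=
              hs x hx y0 hy0mem ((resid_iff p hp _ _).mpr (by rw [hr, hy0r]))
            simpa [hvk] using hx2
          · have hx' : x = (pos, kv) := by simpa using hx
            subst hx'
            have hr : PySem.Int.mod y.1 p = PySem.Int.mod pos p :=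
              (resid_iff p hp _ _).mp (resid_symm p _ _ hm)
            have hy2 : y.2 = y0.2 :=
              hs y hy y0 hy0mem ((resid_iff p hp _ _).mpr (by rw [hr, hy0r]))
            simp only []
            rw [hy2, hvk]
          · have hx' : x = (pos, kv) := by simpa using hx
            have hy' : y = (pos, kv) := by simpa using hy
            subst hx'; subst hy'; rfl
        rw [hstep, ← hfs]
        have H := ih (seen ++ [(pos, kv)]) hnc'
        simp only [List.append_assoc, List.singleton_append] at H
        rw [hfs] at H
        rw [hfs]
        exact H
      · have hstep : aLoop p ((pos, kv) :: rest) (firstSeen p seen)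
            = (firstSeen p seen, false) := by
          simp [aLoop, hg, hvk]
        refine ⟨?_, ?_⟩
        · rw [hstep]
          have hnot : ¬ NoConf p (seen ++ (pos, kv) :: rest) := by
            intro hnc
            have hx : (pos, kv) ∈ seen ++ (pos, kv) :: rest := by simp
            have hy : y0 ∈ seen ++ (pos, kv) :: rest := List.mem_append_left _ hy0mem
            have hkv := hnc (pos, kv) hx y0 hy ((resid_iff p hp _ _).mpr hy0r.symm)
            exact hvk hkv.symm
          simp [hnot]
        · rw [hstep]
          intro h
          simp at h

-- ===== VERDICT (by name: the statement is the Claim_ definition above) =====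
theorem find_consistent_periods_spec : Claim_equal_find_consistent_periods := by
  intro l _
  unfold Spec_find_consistent_periods find_consistent_periods find_consistent_periods_alt
  rw [sieveGroups_eq, PySem.List.foldl_append_singleton_eq_map]
  have hbody : (fun (acc : List (Int × List (Int × Int))) (p : Int) =>
      match aLoop p l PySem.Dict.empty with
      | (residue, ok) => if ok then acc ++ [(p, residue.items)] else acc)
      = fun acc p => if (aLoop p l PySem.Dict.empty).2 then
          acc ++ [(p, (aLoop p l PySem.Dict.empty).1.items)] else acc := by
    funext acc p
    rcases aLoop p l PySem.Dict.empty with ⟨residue, ok⟩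
    rfl
  rw [hbody, PySem.List.foldl_append_if]
  simp only [List.nil_append]
  have hfil : (PySem.List.pyRange 1 27 1).filter (fun p => (aLoop p l PySem.Dict.empty).2)
      = (PySem.List.pyRange 1 27 1).filter
          (fun p => (crossDiffs (bGroups l).values []).all (fun d => PySem.Int.mod d p != 0)) := by
    apply List.filter_congr
    intro p hp
    have hp1 : 0 < p := by
      have := PySem.List.mem_pyRange_one.mp hp
      omega
    have hA : (aLoop p l PySem.Dict.empty).2 = true ↔ NoConf p l :=
      (aside p hp1 l [] (fun x hx => absurd hx (List.not_mem_nil))).1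
    have hB := bside p l
    rw [Bool.eq_iff_iff]
    exact hA.trans hB.symm
  rw [hfil]
  apply List.map_congr_left
  intro p hp
  rw [List.mem_filter] at hp
  have hp1 : 0 < p := by
    have := PySem.List.mem_pyRange_one.mp hp.1
    omega
  have hok : (aLoop p l PySem.Dict.empty).2 = true := by
    have hA : (aLoop p l PySem.Dict.empty).2 = true ↔ NoConf p l :=
      (aside p hp1 l [] (fun x hx => absurd hx (List.not_mem_nil))).1
    exact hA.mpr ((bside p l).mp hp.2)
  have hdict : (aLoop p l PySem.Dict.empty).1 = firstSeen p l :=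
    (aside p hp1 l [] (fun x hx => absurd hx (List.not_mem_nil))).2 hok
  rw [hdict]
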